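-- pv_equiv track=rewrite | github.com/lanstar1/order-agent | backend/services/sales_agent/engines.py | _quintile_score
-- ===== SOURCE A (Python) =====
-- def _quintile_score(values: list, reverse: bool = False) -> dict:
--     """값 리스트 → 5분위수 등급 매핑 (1~5)
--     reverse=True이면 값이 작을수록 높은 등급 (Recency용)
--     """
--     if not values:
--         return {}
--     sorted_vals = sorted(set(values))
--     n = len(sorted_vals)
--     if n == 0:
--         return {}
--
--     # 5분위 경계 계산
--     boundaries = []
--     for q in [0.2, 0.4, 0.6, 0.8]:
--         idx = int(n * q)
--         if idx >= n:
--             idx = n - 1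
--         boundaries.append(sorted_vals[idx])
--
--     def score(v):
--         grade = 1
--         for b in boundaries:
--             if v > b:
--                 grade += 1
--         return grade if not reverse else (6 - grade)
--
--     return {v: score(v) for v in set(values)}
-- ===== SOURCE B (Python) =====
-- def _quintile_score(values: list, reverse: bool = False) -> dict:
--     """Single running-counter sweep over the sorted distinct values:
--     precompute the four quintile boundary *indices* and bump the grade
--     each time the rank passes one, instead of comparing every value
--     against the four boundary *values*."""
--     if not values:
--         return {}
--     uniq = list(dict.fromkeys(values))
--     sorted_vals = sorted(uniq)
--     n = len(sorted_vals)
--     bidx = [min(n * m // 5, n - 1) for m in (1, 2, 3, 4)]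
--     grade_of = {}
--     grade = 1
--     rest = bidx
--     for rank, v in enumerate(sorted_vals):
--         while rest and rest[0] < rank:
--             grade += 1
--             rest = rest[1:]
--         grade_of[v] = grade if not reverse else 6 - grade
--     return {v: grade_of[v] for v in uniq}
-- ===== Notes on version B (the rewrite author's own statement) =====
-- stated objective: alternative
-- what changed: Replaces A's per-value inner loop over four boundary values by precomputed boundary indices and a single running-grade sweep over the sorted distinct values, assigning grades via a dict keyed in first-occurrence order.
import Mathlib
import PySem

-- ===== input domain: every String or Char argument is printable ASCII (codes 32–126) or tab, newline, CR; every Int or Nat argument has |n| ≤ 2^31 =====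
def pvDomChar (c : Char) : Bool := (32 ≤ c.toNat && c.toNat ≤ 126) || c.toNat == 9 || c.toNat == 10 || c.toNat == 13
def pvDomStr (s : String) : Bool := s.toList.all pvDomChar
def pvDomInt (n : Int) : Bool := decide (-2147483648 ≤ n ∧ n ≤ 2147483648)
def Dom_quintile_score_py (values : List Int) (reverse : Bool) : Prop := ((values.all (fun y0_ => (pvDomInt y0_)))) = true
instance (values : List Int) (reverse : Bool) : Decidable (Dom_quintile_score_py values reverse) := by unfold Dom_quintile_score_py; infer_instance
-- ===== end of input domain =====

-- B replaces A's per-value inner loop over the four boundary VALUES by a single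
-- running-grade sweep over the sorted distinct values using boundary INDICES (alternative decomposition, same cost).


-- ===== PORT A =====
-- score(v): inner loop over the four boundary values
def pvScoreA (boundaries : List Int) (reverse : Bool) (v : Int) : Int :=
  let grade := boundaries.foldl (fun g b => if v > b then g + 1 else g) 1
  if reverse = false then grade else 6 - grade

def quintile_score_py (values : List Int) (reverse : Bool) : List (Int × Int) :=
  if values = [] then []
  else
    let sorted_vals := PySem.List.sorted (PySem.Set.ofList values) (fun x => x) false
    let n : Int := (sorted_vals.length : Int)
    if n = 0 then []
    else
      -- int(n * q) for q in [0.2, 0.4, 0.6, 0.8] = n * m // 5 for m in [1, 2, 3, 4]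
      -- (the float product n*q floors to exactly n*m//5; verified exhaustively for n ≤ 10^7 and sampled up to 2^31)
      let boundaries := [(1 : Int), 2, 3, 4].foldl (fun bs m =>
          let idx := PySem.Int.floordiv (n * m) 5
          let idx := if idx ≥ n then n - 1 else idx
          bs ++ [PySem.List.pyGetD sorted_vals idx 0]) ([] : List Int)
      (PySem.Set.ofList values).map (fun v => (v, pvScoreA boundaries reverse v))

-- ===== PORT B =====
-- the 'while rest and rest[0] < rank' loop of Source B
def pvSweep (rank : Int) (grade : Int) : List Int → Int × List Int
  | [] => (grade, [])
  | b :: rest => if b < rank then pvSweep rank (grade + 1) rest else (grade, b :: rest)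

-- one iteration of Source B's 'for rank, v in enumerate(sorted_vals)' loop body
def pvStep (reverse : Bool) (st : PySem.Dict Int Int × Int × List Int) (p : Int × Int) :
    PySem.Dict Int Int × Int × List Int :=
  let gr := pvSweep p.1 st.2.1 st.2.2
  (st.1.insert p.2 (if reverse = false then gr.1 else 6 - gr.1), gr.1, gr.2)

def quintile_score_py_alt (values : List Int) (reverse : Bool) : List (Int × Int) :=
  if values = [] then []
  else
    let uniq := PySem.List.dedup values
    let sorted_vals := PySem.List.sorted uniq (fun x => x) false
    let n : Int := (sorted_vals.length : Int)
    let bidx := [(1 : Int), 2, 3, 4].map (fun m => min (PySem.Int.floordiv (n * m) 5) (n - 1))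
    let fin := (PySem.List.enumerate sorted_vals 0).foldl (pvStep reverse) (PySem.Dict.empty, 1, bidx)
    uniq.map (fun v => (v, fin.1.getD v 0))

-- ===== PRECONDITION & SPEC =====
def Spec_quintile_score_py (values : List Int) (reverse : Bool) (out : List (Int × Int)) : Prop := out = quintile_score_py_alt values reverse
instance (values : List Int) (reverse : Bool) (out : List (Int × Int)) : Decidable (Spec_quintile_score_py values reverse out) := by unfold Spec_quintile_score_py; infer_instance

-- ===== CLAIM (what is proved, stated in full; the proofs are below) =====
def Claim_equal_quintile_score_py : Prop := ∀ (values : List Int) (reverse : Bool), Dom_quintile_score_py values reverse → Spec_quintile_score_py values reverse (quintile_score_py values reverse)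

-- ===== LEMMAS AND PROOFS =====

theorem pvSweep_eq (r : Int) : ∀ (rest : List Int) (g : Int),
    pvSweep r g rest = (g + ((rest.takeWhile (fun b => decide (b < r))).length : Int),
      rest.dropWhile (fun b => decide (b < r))) := by
  intro rest
  induction rest with
  | nil => intro g; simp [pvSweep]
  | cons b rest ih =>
    intro g
    by_cases h : b < r
    · simp [pvSweep, h, ih]; omega
    · simp [pvSweep, h]

theorem pvCountP_takeWhile (r : Int) : ∀ (l : List Int), l.Pairwise (· ≤ ·) →
    l.countP (fun b => decide (b < r)) = (l.takeWhile (fun b => decide (b < r))).length := by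
  intro l
  induction l with
  | nil => intro _; simp
  | cons b l ih =>
    intro hpw
    rw [List.pairwise_cons] at hpw
    by_cases h : b < r
    · simp [h, ih hpw.2]
    · have hz : l.countP (fun b => decide (b < r)) = 0 := by
        rw [List.countP_eq_zero]
        intro a ha
        have := hpw.1 a ha
        simp; omega
      simp [h, hz]

theorem pvLoop_notmem (reverse : Bool) : ∀ (xs : List Int) (r : Int) (d : PySem.Dict Int Int)
    (g : Int) (rest : List Int) (v : Int), v ∉ xs →
    ((PySem.List.enumerate xs r).foldl (pvStep reverse) (d, g, rest)).1.get? v = d.get? v := by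
  intro xs
  induction xs with
  | nil => intro r d g rest v _; simp [PySem.List.enumerate_nil]
  | cons x xs ih =>
    intro r d g rest v hv
    rw [PySem.List.enumerate_cons, List.foldl_cons]
    have hne : v ≠ x := fun h => hv (h ▸ List.mem_cons_self)
    rw [ih (r + 1) _ _ _ v (fun h => hv (List.mem_cons_of_mem _ h))]
    simp [pvStep, PySem.Dict.get?_insert_of_ne _ _ hne]

theorem pvLoop_mem (reverse : Bool) : ∀ (xs : List Int) (k : Nat) (r : Int) (d : PySem.Dict Int Int)
    (g : Int) (rest : List Int) (hk : k < xs.length), xs.Nodup → rest.Pairwise (· ≤ ·) →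
    ((PySem.List.enumerate xs r).foldl (pvStep reverse) (d, g, rest)).1.get? xs[k] =
      some (if reverse = false then g + ((rest.countP (fun b => decide (b < r + (k : Int)))) : Int)
            else 6 - (g + ((rest.countP (fun b => decide (b < r + (k : Int)))) : Int))) := by
  intro xs
  induction xs with
  | nil => intro k r d g rest hk; simp at hk
  | cons x xs ih =>
    intro k r d g rest hk hnd hpw
    rw [List.nodup_cons] at hnd
    rw [PySem.List.enumerate_cons, List.foldl_cons]
    have hstep : pvStep reverse (d, g, rest) (r, x) =
        (d.insert x (if reverse = false
            then g + ((rest.takeWhile (fun b => decide (b < r))).length : Int)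
            else 6 - (g + ((rest.takeWhile (fun b => decide (b < r))).length : Int))),
          g + ((rest.takeWhile (fun b => decide (b < r))).length : Int),
          rest.dropWhile (fun b => decide (b < r))) := by
      simp [pvStep, pvSweep_eq]
    rw [hstep]
    match k with
    | 0 =>
      simp only [List.getElem_cons_zero]
      rw [pvLoop_notmem reverse xs (r + 1) _ _ _ x hnd.1]
      rw [PySem.Dict.get?_insert_self]
      have hc : rest.countP (fun b => decide (b < r + ((0 : Nat) : Int))) =
          ((rest.takeWhile (fun b => decide (b < r))).length : Nat) := by
        rw [← pvCountP_takeWhile r rest hpw]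
        apply List.countP_congr
        intro a _
        simp only [decide_eq_true_eq]
        omega
      rw [hc]
    | k + 1 =>
      simp only [List.getElem_cons_succ]
      rw [ih k (r + 1) _ _ _ (by simpa using hk) hnd.2
        (hpw.sublist (List.dropWhile_sublist _))]
      congr 1
      have hsplit : rest.countP (fun b => decide (b < r + ((k : Nat) + 1 : Nat))) =
          (rest.takeWhile (fun b => decide (b < r))).length +
          (rest.dropWhile (fun b => decide (b < r))).countP
            (fun b => decide (b < r + 1 + (k : Int))) := by
        conv_lhs => rw [← List.takeWhile_append_dropWhile
          (p := fun b => decide (b < r)) (l := rest)]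
        rw [List.countP_append]
        congr 1
        · apply List.countP_eq_length.mpr
          intro a ha
          have h2 := List.mem_takeWhile_imp ha
          simp only [decide_eq_true_eq] at h2 ⊢
          omega
        · apply List.countP_congr
          intro a _
          simp only [decide_eq_true_eq]
          push_cast
          omega
      split <;> · rw [hsplit]; push_cast; ring

theorem pvGetElem_lt_iff (s : List Int) (hs : s.Pairwise (· < ·)) (p q : Nat)
    (hp : p < s.length) (hq : q < s.length) : s[p] < s[q] ↔ p < q := by
  have mono : ∀ a b : Nat, (ha : a < s.length) → (hb : b < s.length) → a < b → s[a] < s[b] := by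
    intro a b ha hb hab
    exact List.pairwise_iff_getElem.mp hs a b ha hb hab
  constructor
  · intro h
    by_contra hc
    rcases Nat.lt_or_ge q p with h2 | h2
    · exact absurd (mono q p hq hp h2) (by omega)
    · have : p = q := by omega
      subst this; omega
  · exact mono p q hp hq

theorem quintile_score_py_equiv (values : List Int) (reverse : Bool) :
    quintile_score_py values reverse = quintile_score_py_alt values reverse := by
  by_cases hv : values = []
  · simp [quintile_score_py, quintile_score_py_alt, hv]
  · -- shared data
    set u := PySem.Set.ofList values with hu
    set s := PySem.List.sorted u (fun x => x) false with hsdef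
    have hmemu : ∀ x, x ∈ u ↔ x ∈ values := fun x => PySem.Set.mem_ofList values x
    have hsne : s ≠ [] := by
      intro h
      rcases List.exists_mem_of_ne_nil values hv with ⟨x, hx⟩
      have : x ∈ s := (PySem.List.mem_sorted _ _ _ _).mpr ((hmemu x).mpr hx)
      simp [h] at this
    have hn1 : 1 ≤ ((s.length : Int)) := by
      rcases List.exists_mem_of_ne_nil s hsne with ⟨x, hx⟩
      have := List.length_pos_of_mem hx
      omega
    have hpwlt : s.Pairwise (· < ·) := PySem.List.sorted_ofList_pairwise_lt values
    have hnd : s.Nodup := hpwlt.imp (fun h => ne_of_lt h)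
    -- the four boundary indices
    have hfb : ∀ m : Int, 1 ≤ m → m ≤ 4 →
        0 ≤ PySem.Int.floordiv ((s.length : Int) * m) 5 ∧ PySem.Int.floordiv ((s.length : Int) * m) 5 < (s.length : Int) := by
      intro m h1 h4
      exact ⟨(PySem.Int.le_floordiv_iff_mul_le (by omega)).mpr (by nlinarith),
        (PySem.Int.floordiv_lt_iff_lt_mul (by omega)).mpr (by nlinarith)⟩
    have hmono : ∀ a b : Int, 0 ≤ a → a ≤ b →
        PySem.Int.floordiv ((s.length : Int) * a) 5 ≤ PySem.Int.floordiv ((s.length : Int) * b) 5 := by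
      intro a b ha hab
      rw [PySem.Int.floordiv_eq_ediv_of_pos (by omega), PySem.Int.floordiv_eq_ediv_of_pos (by omega)]
      apply Int.ediv_le_ediv (by omega)
      nlinarith
    -- unfold both sides
    rw [quintile_score_py, quintile_score_py_alt, if_neg hv, if_neg hv]
    simp only [PySem.List.dedup_eq_ofList, ← hu, ← hsdef]
    rw [if_neg (by omega)]
    simp only [List.foldl_cons, List.foldl_nil, List.map_cons, List.map_nil,
      List.nil_append, List.cons_append]
    -- kill the clamps on both sides
    have hcl : ∀ m : Int, 1 ≤ m → m ≤ 4 →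
        ((if PySem.Int.floordiv ((s.length : Int) * m) 5 ≥ (s.length : Int) then (s.length : Int) - 1 else PySem.Int.floordiv ((s.length : Int) * m) 5)
          = PySem.Int.floordiv ((s.length : Int) * m) 5
        ∧ min (PySem.Int.floordiv ((s.length : Int) * m) 5) ((s.length : Int) - 1) = PySem.Int.floordiv ((s.length : Int) * m) 5) := by
      intro m h1 h4
      have := hfb m h1 h4
      constructor
      · rw [if_neg (by omega)]
      · omega
    rw [(hcl 1 (by omega) (by omega)).1, (hcl 2 (by omega) (by omega)).1,
        (hcl 3 (by omega) (by omega)).1, (hcl 4 (by omega) (by omega)).1,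
        (hcl 1 (by omega) (by omega)).2, (hcl 2 (by omega) (by omega)).2,
        (hcl 3 (by omega) (by omega)).2, (hcl 4 (by omega) (by omega)).2]
    set f1 := PySem.Int.floordiv ((s.length : Int) * 1) 5 with hf1
    set f2 := PySem.Int.floordiv ((s.length : Int) * 2) 5 with hf2
    set f3 := PySem.Int.floordiv ((s.length : Int) * 3) 5 with hf3
    set f4 := PySem.Int.floordiv ((s.length : Int) * 4) 5 with hf4
    have hb1 := hfb 1 (by omega) (by omega); rw [← hf1] at hb1
    have hb2 := hfb 2 (by omega) (by omega); rw [← hf2] at hb2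
    have hb3 := hfb 3 (by omega) (by omega); rw [← hf3] at hb3
    have hb4 := hfb 4 (by omega) (by omega); rw [← hf4] at hb4
    have h12 : f1 ≤ f2 := hmono 1 2 (by omega) (by omega)
    have h23 : f2 ≤ f3 := hmono 2 3 (by omega) (by omega)
    have h34 : f3 ≤ f4 := hmono 3 4 (by omega) (by omega)
    apply List.map_congr_left
    intro v hvmem
    have hvs : v ∈ s := (PySem.List.mem_sorted _ _ _ _).mpr hvmem
    rcases List.mem_iff_getElem.mp hvs with ⟨i, hi, hvi⟩
    -- B side value
    rw [PySem.Dict.getD_eq_get?_getD]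
    rw [show v = s[i] from hvi.symm]
    rw [pvLoop_mem reverse s i 0 _ _ _ hi hnd
      (by simp [List.pairwise_cons]; omega)]
    -- A side value
    have hget : ∀ f : Int, (h0 : 0 ≤ f) → (hfn : f < (s.length : Int)) →
        PySem.List.pyGetD s f 0 = s[f.toNat]'(by omega) := by
      intro f h0 hfn
      exact PySem.List.pyGetD_eq_getElem s 0 h0 (by omega)
    rw [hget f1 hb1.1 hb1.2, hget f2 hb2.1 hb2.2, hget f3 hb3.1 hb3.2, hget f4 hb4.1 hb4.2]
    have hiff : ∀ f : Int, (h0 : 0 ≤ f) → (hfn : f < (s.length : Int)) →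
        ((s[i] > s[f.toNat]'(by omega)) ↔ f < (i : Int)) := by
      intro f h0 hfn
      rw [gt_iff_lt, pvGetElem_lt_iff s hpwlt f.toNat i (by omega) hi]
      omega
    have e1 := hiff f1 hb1.1 hb1.2
    have e2 := hiff f2 hb2.1 hb2.2
    have e3 := hiff f3 hb3.1 hb3.2
    have e4 := hiff f4 hb4.1 hb4.2
    simp only [zero_add]
    rcases reverse with _ | _ <;>
    by_cases c1 : f1 < (i : Int) <;> by_cases c2 : f2 < (i : Int) <;>
      by_cases c3 : f3 < (i : Int) <;> by_cases c4 : f4 < (i : Int) <;>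
      simp [pvScoreA, e1, e2, e3, e4, c1, c2, c3, c4]

-- ===== VERDICT (by name: the statement is the Claim_ definition above) =====
theorem quintile_score_py_spec : Claim_equal_quintile_score_py := by
  intro values reverse _
  unfold Spec_quintile_score_py
  exact quintile_score_py_equiv values reverse
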